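-- pv_equiv track=rewrite | github.com/MrBrantCode/unitest_baseline | mut_generate/mist_train_taco/taco_717/solution.py | can_make_sugarcanes_same_height
-- ===== SOURCE A (Python) =====
-- def can_make_sugarcanes_same_height(N, heights):
--     if N < 1 or N > 50:
--         raise ValueError("Number of sugarcanes must be between 1 and 50 inclusive.")
--
--     for height in heights:
--         if height < 1 or height > 1000000000:
--             raise ValueError("Height of sugarcanes must be between 1 and 1,000,000,000 inclusive.")
--
--     # Normalize all heights by repeatedly dividing by 2
--     normalized_heights = []
--     for height in heights:
--         while height % 2 == 0:
--             height //= 2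
--         normalized_heights.append(height)
--
--     # Check if all normalized heights are the same
--     if all(h == normalized_heights[0] for h in normalized_heights):
--         return "YES"
--     else:
--         return "NO"
-- ===== SOURCE B (Python) =====
-- def can_make_sugarcanes_same_height(N, heights):
--     if N < 1 or N > 50:
--         raise ValueError("Number of sugarcanes must be between 1 and 50 inclusive.")
--
--     for height in heights:
--         if height < 1 or height > 1000000000:
--             raise ValueError("Height of sugarcanes must be between 1 and 1,000,000,000 inclusive.")
--
--     # Odd part in closed form: h // (h & -h) divides out the lowest set bit.
--     odd_parts = {h // (h & -h) for h in heights}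
--     return "YES" if len(odd_parts) <= 1 else "NO"
-- ===== Notes on version B (the rewrite author's own statement) =====
-- stated objective: simpler
-- what changed: The per-height while-loop stripping factors of 2 is replaced by the closed-form odd-part h // (h & -h), and the all-equal-to-first scan over a built list is replaced by collecting odd parts into a set and testing its size <= 1.
import Mathlib
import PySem

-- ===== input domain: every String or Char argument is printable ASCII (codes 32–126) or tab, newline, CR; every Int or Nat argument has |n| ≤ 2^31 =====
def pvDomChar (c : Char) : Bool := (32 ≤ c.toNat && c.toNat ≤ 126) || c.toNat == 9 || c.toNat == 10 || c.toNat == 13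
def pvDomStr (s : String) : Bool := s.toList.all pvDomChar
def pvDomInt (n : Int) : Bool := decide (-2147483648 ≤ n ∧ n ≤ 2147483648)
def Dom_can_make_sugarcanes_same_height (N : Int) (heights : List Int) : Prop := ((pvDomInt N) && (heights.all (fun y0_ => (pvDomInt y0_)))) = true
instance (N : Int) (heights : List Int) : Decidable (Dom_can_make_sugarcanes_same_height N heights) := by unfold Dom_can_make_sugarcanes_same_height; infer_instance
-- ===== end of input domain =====

-- B replaces A's per-height factor-of-2 stripping loop by the closed-form odd part
-- h // (h & -h) and the all-equal-to-first scan by a set of odd parts of size ≤ 1 (simpler).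

-- ===== PORT A =====
-- while height % 2 == 0: height //= 2   (the 0 < h guard only makes the recursion total;
-- A only runs the loop on validated heights 1 ≤ h)
def stripA (h : Int) : Int :=
  if _h0 : 0 < h then
    if PySem.Int.mod h 2 = 0 then
      stripA (PySem.Int.floordiv h 2)
    else h
  else h
termination_by h.natAbs
decreasing_by
  have : PySem.Int.floordiv h 2 = h / 2 := PySem.Int.floordiv_eq_ediv_of_pos (by omega)
  rw [this]; omega

def can_make_sugarcanes_same_height (N : Int) (heights : List Int) : String :=
  if N < 1 ∨ 50 < N then ""  -- raise ValueError (outside Pre_)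
  else if heights.any (fun h => decide (h < 1 ∨ 1000000000 < h)) then ""  -- raise ValueError (outside Pre_)
  else
    let normalized := heights.foldl (fun acc h => acc ++ [stripA h]) []
    if normalized.all (fun h => PySem.List.pyGet? normalized 0 == some h) then "YES" else "NO"

-- ===== PORT B =====
def can_make_sugarcanes_same_height_alt (N : Int) (heights : List Int) : String :=
  if N < 1 ∨ 50 < N then ""  -- raise ValueError (outside Pre_)
  else if heights.any (fun h => decide (h < 1 ∨ 1000000000 < h)) then ""  -- raise ValueError (outside Pre_)
  else
    let odd_parts : PySem.Set Int :=
      PySem.Set.ofList (heights.map (fun h => PySem.Int.floordiv h (PySem.Int.band h (-h))))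
    if odd_parts.length ≤ 1 then "YES" else "NO"

-- ===== PRECONDITION & SPEC =====
-- Pre_ excludes exactly the inputs on which A raises ValueError (N outside 1..50 or a height outside 1..10^9).
def Pre_can_make_sugarcanes_same_height (N : Int) (heights : List Int) : Prop :=
  1 ≤ N ∧ N ≤ 50 ∧ ∀ h ∈ heights, 1 ≤ h ∧ h ≤ 1000000000
instance (N : Int) (heights : List Int) : Decidable (Pre_can_make_sugarcanes_same_height N heights) := by
  unfold Pre_can_make_sugarcanes_same_height; infer_instance

def pvWitness_can_make_sugarcanes_same_height : Int × List Int := (3, [6, 3, 12])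

def Spec_can_make_sugarcanes_same_height (N : Int) (heights : List Int) (out : String) : Prop := out = can_make_sugarcanes_same_height_alt N heights
instance (N : Int) (heights : List Int) (out : String) : Decidable (Spec_can_make_sugarcanes_same_height N heights out) := by unfold Spec_can_make_sugarcanes_same_height; infer_instance

-- ===== CLAIM (what is proved, stated in full; the proofs are below) =====
def Claim_equal_can_make_sugarcanes_same_height : Prop := ∀ (N : Int) (heights : List Int), Dom_can_make_sugarcanes_same_height N heights → Pre_can_make_sugarcanes_same_height N heights → Spec_can_make_sugarcanes_same_height N heights (can_make_sugarcanes_same_height N heights)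

-- ===== LEMMAS AND PROOFS =====

-- Nat-level model of A's stripping loop
def stripNat (m : Nat) : Nat :=
  if h : 0 < m ∧ m % 2 = 0 then stripNat (m / 2) else m
termination_by m
decreasing_by omega

-- bit arithmetic: lowest set bit as m - (m &&& (m-1))
lemma land_bit_bit (a b : Bool) (m n : Nat) :
    (2 * m + a.toNat) &&& (2 * n + b.toNat) = 2 * (m &&& n) + (a && b).toNat := by
  apply Nat.eq_of_testBit_eq
  intro i
  cases i with
  | zero =>
    cases a <;> cases b <;>
      simp [Nat.testBit_zero]
  | succ i =>
    simp only [Nat.testBit_land]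
    cases a <;> cases b <;>
      simp [Nat.testBit_succ, Nat.mul_add_div]

lemma land_self_nat (k : Nat) : k &&& k = k := by
  apply Nat.eq_of_testBit_eq
  intro i
  simp

lemma lowbit_key (m : Nat) (hm : 0 < m) :
    (m - (m &&& (m - 1))) * stripNat m = m ∧ 0 < m - (m &&& (m - 1)) := by
  induction m using Nat.strong_induction_on with
  | _ m ih =>
    by_cases he : m % 2 = 0
    · -- even, m = 2k with k = m/2 > 0
      set k := m / 2 with hk
      have hm2 : m = 2 * k := by omega
      have hk0 : 0 < k := by omega
      have hsub : m - 1 = 2 * (k - 1) + 1 := by omega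
      have hland : m &&& (m - 1) = 2 * (k &&& (k - 1)) := by
        rw [hsub, hm2]
        have := land_bit_bit false true k (k - 1)
        simpa using this
      obtain ⟨ihk, ihp⟩ := ih k (by omega) hk0
      have hle : k &&& (k - 1) ≤ k := Nat.and_le_left
      have hstrip : stripNat m = stripNat k := by
        rw [stripNat]
        rw [dif_pos ⟨hm, he⟩]
      constructor
      · rw [hland, hstrip]
        calc (m - 2 * (k &&& (k - 1))) * stripNat k
            = (2 * (k - (k &&& (k - 1)))) * stripNat k := by
              congr 1; omega
          _ = 2 * ((k - (k &&& (k - 1))) * stripNat k) := by ring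
          _ = 2 * k := by rw [ihk]
          _ = m := hm2.symm
      · rw [hland]; omega
    · -- odd, m = 2k+1
      set k := m / 2 with hk
      have hm2 : m = 2 * k + 1 := by omega
      have hland : m &&& (m - 1) = m - 1 := by
        have hsub : m - 1 = 2 * k := by omega
        rw [hsub, hm2]
        have := land_bit_bit true false k k
        simpa [land_self_nat] using this
      have hstrip : stripNat m = m := by
        rw [stripNat]
        rw [dif_neg (by omega)]
      rw [hland, hstrip]
      constructor
      · have : m - (m - 1) = 1 := by omega
        rw [this]; omega
      · omega

lemma oddpart_div (m : Nat) (hm : 0 < m) :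
    m / (m - (m &&& (m - 1))) = stripNat m := by
  obtain ⟨hkey, hpos⟩ := lowbit_key m hm
  calc m / (m - (m &&& (m - 1)))
      = ((m - (m &&& (m - 1))) * stripNat m) / (m - (m &&& (m - 1))) := by rw [hkey]
    _ = stripNat m := Nat.mul_div_cancel_left _ hpos

lemma stripA_natCast (m : Nat) (hm : 0 < m) : stripA (m : Int) = ((stripNat m : Nat) : Int) := by
  induction m using Nat.strong_induction_on with
  | _ m ih =>
    rw [stripA, stripNat]
    have hpos : (0 : Int) < (m : Int) := by exact_mod_cast hm
    rw [dif_pos hpos]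
    have hmod : PySem.Int.mod (m : Int) 2 = ((m % 2 : Nat) : Int) := by
      exact_mod_cast PySem.Int.mod_natCast m 2
    by_cases he : m % 2 = 0
    · rw [if_pos (by rw [hmod, he]; rfl)]
      have hf : PySem.Int.floordiv (m : Int) 2 = ((m / 2 : Nat) : Int) := by
        exact_mod_cast PySem.Int.floordiv_natCast m 2
      rw [hf, ih (m / 2) (by omega) (by omega), dif_pos ⟨hm, he⟩]
    · rw [if_neg (by rw [hmod]; exact_mod_cast by omega), dif_neg (by omega)]

lemma band_neg (h : Int) (hh : 1 ≤ h) :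
    PySem.Int.band h (-h) = ((h.toNat - (h.toNat &&& (h.toNat - 1)) : Nat) : Int) := by
  unfold PySem.Int.band
  rw [if_pos (by omega), if_neg (by omega)]
  have : (-(-h) - 1).toNat = h.toNat - 1 := by omega
  rw [this]

-- B's closed-form odd part equals A's loop, for validated heights
lemma oddpart_eq_strip (h : Int) (h1 : 1 ≤ h) :
    PySem.Int.floordiv h (PySem.Int.band h (-h)) = stripA h := by
  obtain ⟨m, rfl⟩ : ∃ m : Nat, h = (m : Int) := ⟨h.toNat, by omega⟩
  have hm : 0 < m := by exact_mod_cast h1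
  rw [band_neg _ h1]
  have htn : ((m : Int)).toNat = m := by omega
  rw [htn]
  have hf : PySem.Int.floordiv (m : Int) ((m - (m &&& (m - 1)) : Nat) : Int)
      = ((m / (m - (m &&& (m - 1))) : Nat) : Int) :=
    PySem.Int.floordiv_natCast m _
  rw [hf, oddpart_div m hm, stripA_natCast m hm]

lemma foldl_append_map (f : Int → Int) (xs : List Int) (acc : List Int) :
    xs.foldl (fun acc h => acc ++ [f h]) acc = acc ++ xs.map f := by
  induction xs generalizing acc with
  | nil => simp
  | cons x t ih => simp [List.foldl, ih]

-- all-equal-to-first over ys  ↔  set(ys) has at most one element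
lemma eq_singleton_of_nodup_all_eq {l : List Int} {y : Int} (hn : l.Nodup) (hy : y ∈ l)
    (hall : ∀ x ∈ l, x = y) : l = [y] := by
  match l with
  | [] => cases hy
  | [a] => rw [hall a (by simp)]
  | a :: b :: r =>
    have ha := hall a (by simp)
    have hb := hall b (by simp)
    subst ha; subst hb
    simp at hn

lemma eq_singleton_of_len_le_one {l : List Int} {y : Int} (hy : y ∈ l) (hl : l.length ≤ 1) :
    l = [y] := by
  match l with
  | [] => cases hy
  | [a] => simp at hy; rw [hy]
  | a :: b :: r => simp at hl

lemma all_head_iff_set_le_one (ys : List Int) :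
    (ys.all (fun h => PySem.List.pyGet? ys 0 == some h)) = decide ((PySem.Set.ofList ys).length ≤ 1) := by
  cases ys with
  | nil => rfl
  | cons y t =>
    have hget : PySem.List.pyGet? (y :: t) (0 : Int) = some y := by
      simp [PySem.List.pyGet?, PySem.List.pyIdx?]
    rw [hget]
    have key : ((y :: t).all fun h => some y == some h) = true ↔
        (PySem.Set.ofList (y :: t)).length ≤ 1 := by
      simp only [List.all_eq_true, beq_iff_eq, Option.some.injEq]
      constructor
      · intro hall
        have hy : y ∈ PySem.Set.ofList (y :: t) := by
          rw [PySem.Set.mem_ofList]; simp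
        have := eq_singleton_of_nodup_all_eq (PySem.Set.nodup_ofList (y :: t)) hy
          (fun x hx => by
            have hx' : x ∈ y :: t := (PySem.Set.mem_ofList _ _).1 hx
            exact (hall x hx').symm)
        rw [this]; simp
      · intro hlen x hx
        have hy : y ∈ PySem.Set.ofList (y :: t) := by
          rw [PySem.Set.mem_ofList]; simp
        have hs := eq_singleton_of_len_le_one hy hlen
        have hx' : x ∈ PySem.Set.ofList (y :: t) := by
          rw [PySem.Set.mem_ofList]; exact hx
        rw [hs] at hx'
        simp at hx'
        rw [hx']
    by_cases hc : (PySem.Set.ofList (y :: t)).length ≤ 1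
    · rw [key.2 hc, decide_eq_true hc]
    · have h1 : ((y :: t).all fun h => some y == some h) = false := by
        cases hb : ((y :: t).all fun h => some y == some h)
        · rfl
        · exact absurd (key.1 hb) hc
      rw [h1, decide_eq_false hc]

-- ===== VERDICT (by name: the statement is the Claim_ definition above) =====
theorem can_make_sugarcanes_same_height_spec : Claim_equal_can_make_sugarcanes_same_height := by
  intro N heights _ hpre
  obtain ⟨hN1, hN2, hH⟩ := hpre
  unfold Spec_can_make_sugarcanes_same_height
  unfold can_make_sugarcanes_same_height can_make_sugarcanes_same_height_alt
  have hnot : ¬ (N < 1 ∨ 50 < N) := by omega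
  rw [if_neg hnot, if_neg hnot]
  have hany : heights.any (fun h => decide (h < 1 ∨ 1000000000 < h)) = false := by
    simp only [List.any_eq_false, decide_eq_true_eq]
    intro h hmem
    have := hH h hmem; omega
  rw [hany]
  simp only [Bool.false_eq_true, if_false]
  rw [foldl_append_map]
  simp only [List.nil_append]
  have hmapeq : heights.map (fun h => PySem.Int.floordiv h (PySem.Int.band h (-h))) = heights.map stripA := by
    apply List.map_congr_left
    intro h hmem
    exact oddpart_eq_strip h (hH h hmem).1
  rw [hmapeq]
  simp only [all_head_iff_set_le_one]
  by_cases hc : (PySem.Set.ofList (heights.map stripA)).length ≤ 1 <;> simp [hc]
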